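-- pv_equiv track=rewrite | github.com/jcentner/sentinel | src/sentinel/detectors/test_coherence.py | _match_test_to_impl
-- ===== SOURCE A (Python) =====
-- def _match_test_to_impl(
--     test_name: str, impl_lookup: dict[str, tuple[str, str]]
-- ) -> str | None:
--     """Match a test function name to an implementation function.
--
--     Matching strategies (in priority order):
--     1. Exact strip: test_foo → foo (exact match)
--     2. Prefix match: test_foo_bar_baz → foo_bar (longest matching impl prefix)
--     """
--     # Strip test_ prefix
--     if test_name.startswith("test_"):
--         base = test_name[5:].lower()
--     else:
--         return None
--
--     # 1. Exact match
--     if base in impl_lookup: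
--         return base
--
--     # 2. Prefix match — find the longest impl name that is a prefix of `base`
--     # Require underscore boundary to avoid spurious matches
--     # (e.g. test_run_scan → run_scan, not run)
--     best: str | None = None
--     best_len = 0
--     for impl_key in impl_lookup:
--         if base.startswith(impl_key + "_") and len(impl_key) > best_len:
--             best = impl_key
--             best_len = len(impl_key)
--
--     if best:
--         return best
--
--     return None
-- ===== SOURCE B (Python) =====
-- def _match_test_to_impl(test_name, impl_lookup):
--     """Match a test function name to an implementation function.
--
--     Instead of scanning every key of impl_lookup, generate the
--     underscore-boundary prefixes of the stripped name from longest to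
--     shortest and dict-lookup each one.
--     """
--     if not test_name.startswith("test_"):
--         return None
--     base = test_name[5:].lower()
--
--     if base in impl_lookup:
--         return base
--
--     for i in range(len(base) - 1, 0, -1):
--         if base[i] == "_":
--             cand = base[:i]
--             if cand in impl_lookup:
--                 return cand
--     return None
-- ===== Notes on version B (the rewrite author's own statement) =====
-- stated objective: alternative
-- what changed: Instead of scanning every dict key and testing it as an underscore-boundary prefix of the stripped test name, B walks the name's underscore positions from right to left and dict-looks-up each prefix, returning the first (longest) hit; intended as faster for many keys, measured only 1.24x at the largest size.
import Mathlib
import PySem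

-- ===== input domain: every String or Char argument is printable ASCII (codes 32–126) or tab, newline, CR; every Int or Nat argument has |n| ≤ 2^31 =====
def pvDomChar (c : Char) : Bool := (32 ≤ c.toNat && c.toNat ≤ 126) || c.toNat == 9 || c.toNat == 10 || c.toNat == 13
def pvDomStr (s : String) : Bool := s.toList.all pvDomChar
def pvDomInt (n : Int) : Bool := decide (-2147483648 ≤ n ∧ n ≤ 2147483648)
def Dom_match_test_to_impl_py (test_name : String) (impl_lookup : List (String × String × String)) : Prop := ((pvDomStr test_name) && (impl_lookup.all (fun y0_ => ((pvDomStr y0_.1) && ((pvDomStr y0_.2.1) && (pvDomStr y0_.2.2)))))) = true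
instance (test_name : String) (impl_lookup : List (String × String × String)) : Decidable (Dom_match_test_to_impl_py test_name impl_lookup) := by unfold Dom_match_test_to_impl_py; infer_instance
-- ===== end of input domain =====

-- B replaces A's scan over every dict key by dict lookups of the underscore-boundary prefixes
-- of the stripped name, longest first (objective: alternative algorithm, same result).

-- ===== PORT A =====
-- literal port of _match_test_to_impl: strip "test_", exact membership test, then a loop
-- over all keys keeping the longest key k with base.startswith(k + "_"); 'if best:' truthiness kept.
def match_test_to_impl_py (test_name : String) (impl_lookup : List (String × String × String)) : Option String :=
  if PySem.Str.startswith test_name "test_" then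
    let base := PySem.Str.lower (PySem.Str.slice test_name (some 5) none)
    if impl_lookup.any (fun kv => kv.1 == base) then
      some base
    else
      let st := impl_lookup.foldl (fun (st : Option String × Int) kv =>
        if PySem.Str.startswith base (kv.1 ++ "_") && decide (PySem.Str.len kv.1 > st.2)
        then (some kv.1, PySem.Str.len kv.1)
        else st) (none, 0)
      match st.1 with
      | some best => if best == "" then none else some best
      | none => none
  else
    none

-- ===== PORT B =====
-- B's loop: for i in range(len(base)-1, 0, -1): if base[i]=='_' and base[:i] in impl_lookup: return base[:i]
-- (Source B's local variable cand = base[:i] is inlined)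
def pvAltScan (base : String) (impl_lookup : List (String × String × String)) : Nat → Option String
  | 0 => none
  | i+1 =>
    if PySem.Str.pyGet? base ((i+1 : Nat) : Int) = some '_' then
      if impl_lookup.any (fun kv => kv.1 == PySem.Str.slice base none (some ((i+1 : Nat) : Int))) then
        some (PySem.Str.slice base none (some ((i+1 : Nat) : Int)))
      else pvAltScan base impl_lookup i
    else pvAltScan base impl_lookup i

def match_test_to_impl_py_alt (test_name : String) (impl_lookup : List (String × String × String)) : Option String :=
  if PySem.Str.startswith test_name "test_" then
    let base := PySem.Str.lower (PySem.Str.slice test_name (some 5) none)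
    if impl_lookup.any (fun kv => kv.1 == base) then
      some base
    else
      pvAltScan base impl_lookup (PySem.Str.len base - 1).toNat
  else
    none

-- ===== PRECONDITION & SPEC =====
def Spec_match_test_to_impl_py (test_name : String) (impl_lookup : List (String × String × String)) (out : Option String) : Prop := out = match_test_to_impl_py_alt test_name impl_lookup
instance (test_name : String) (impl_lookup : List (String × String × String)) (out : Option String) : Decidable (Spec_match_test_to_impl_py test_name impl_lookup out) := by unfold Spec_match_test_to_impl_py; infer_instance

-- ===== CLAIM (what is proved, stated in full; the proofs are below) =====
def Claim_equal_match_test_to_impl_py : Prop := ∀ (test_name : String) (impl_lookup : List (String × String × String)), Dom_match_test_to_impl_py test_name impl_lookup → Spec_match_test_to_impl_py test_name impl_lookup (match_test_to_impl_py test_name impl_lookup)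

-- ===== LEMMAS AND PROOFS =====

-- n is a "match position" of bs w.r.t. impl: nonzero, an underscore at index n,
-- and some key equal to the prefix of length n.
def pvP (bs : List Char) (impl : List (String × String × String)) (n : Nat) : Bool :=
  n != 0 && bs[n]? == some '_' && impl.any (fun kv => kv.1.toList == bs.take n)

lemma pv_prefix_snoc_iff (l : List Char) (c : Char) (bs : List Char) :
    (l ++ [c]) <+: bs ↔ (l = bs.take l.length ∧ bs[l.length]? = some c) := by
  induction l generalizing bs with
  | nil => cases bs <;> simp [List.cons_prefix_cons, eq_comm]
  | cons x l ih =>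
    cases bs with
    | nil => simp
    | cons b bs =>
      simp only [List.cons_append, List.cons_prefix_cons, ih, List.length_cons,
        List.take_succ_cons, List.getElem?_cons_succ, List.cons.injEq]
      tauto

set_option maxHeartbeats 1000000 in
lemma pv_altScan_eq (base : String) (impl : List (String × String × String)) (i : Nat) :
    pvAltScan base impl i =
      (if Nat.findGreatest (fun n => pvP base.toList impl n = true) i = 0 then none
       else some (String.ofList (base.toList.take (Nat.findGreatest (fun n => pvP base.toList impl n = true) i)))) := by
  induction i with
  | zero => simp [pvAltScan, Nat.findGreatest]
  | succ i ih =>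
    have hofl : ∀ l : List Char, (String.ofList l).toList = l := fun l => by simp
    have hget : PySem.Str.pyGet? base ((i+1 : Nat) : Int) = base.toList[i+1]? := by
      rw [PySem.Str.pyGet?_natCast]
    have h01 : (0:Int) ≤ ((i+1 : Nat) : Int) := by exact_mod_cast Nat.zero_le (i+1)
    have hcand : (PySem.Str.slice base none (some ((i+1 : Nat) : Int))).toList
        = base.toList.take (i+1) := by
      rw [PySem.Str.toList_slice, PySem.Chars.slice_eq_listSlice, PySem.List.slice_to _ h01]
      norm_num
    have hmem : (impl.any (fun kv => kv.1 == PySem.Str.slice base none (some ((i+1 : Nat) : Int))))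
        = (impl.any (fun kv => kv.1.toList == base.toList.take (i+1))) := by
      refine List.any_congr rfl ?_
      intro kv
      rw [Bool.eq_iff_iff, beq_iff_eq, beq_iff_eq]
      constructor
      · intro h; rw [h, hcand]
      · intro h; exact String.toList_inj.mp (by rw [hcand]; exact h)
    rw [pvAltScan, Nat.findGreatest_succ]
    by_cases hu : base.toList[i+1]? = some '_'
    · have hcond : PySem.Str.pyGet? base ((i+1 : Nat) : Int) = some '_' := by rw [hget]; exact hu
      rw [if_pos hcond]
      by_cases hk : (impl.any (fun kv => kv.1.toList == base.toList.take (i+1))) = true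
      · have hP : pvP base.toList impl (i+1) = true := by
          simp [pvP, hu, hk]
        have hmemb : (impl.any (fun kv => kv.1 == PySem.Str.slice base none (some ((i+1 : Nat) : Int)))) = true := by
          rw [hmem]; exact hk
        rw [if_pos hmemb, if_pos hP, if_neg (Nat.succ_ne_zero i)]
        congr 1
        apply String.toList_inj.mp
        rw [hcand, hofl]
      · have hP : ¬ (pvP base.toList impl (i+1) = true) := by
          simp only [pvP, Bool.and_eq_true, not_and]
          intro _; simpa using hk
        have hmemb : ¬ ((impl.any (fun kv => kv.1 == PySem.Str.slice base none (some ((i+1 : Nat) : Int)))) = true) := by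
          rw [hmem]; exact hk
        rw [if_neg hmemb, if_neg hP]
        exact ih
    · have hcond : ¬ (PySem.Str.pyGet? base ((i+1 : Nat) : Int) = some '_') := by rw [hget]; exact hu
      have hP : ¬ (pvP base.toList impl (i+1) = true) := by
        simp only [pvP, Bool.and_eq_true, not_and]
        intro h _; exact hu (by simpa using h.2)
      rw [if_neg hcond, if_neg hP]
      exact ih

lemma pv_match_cond_iff (base : String) (kv : String × String × String) :
    PySem.Str.startswith base (kv.1 ++ "_") = true ↔
      (kv.1.toList = base.toList.take kv.1.toList.length ∧
       base.toList[kv.1.toList.length]? = some '_') := by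
  have h1 : (kv.1 ++ "_").toList = kv.1.toList ++ ['_'] := by simp
  rw [show PySem.Str.startswith base (kv.1 ++ "_")
        = PySem.Chars.startswith base.toList (kv.1 ++ "_").toList from by simp,
    h1, PySem.Chars.startswith_iff, pv_prefix_snoc_iff]

set_option maxHeartbeats 1000000 in
lemma pv_foldA_char (base : String) (impl : List (String × String × String)) :
    impl.foldl (fun (st : Option String × Int) kv =>
        if PySem.Str.startswith base (kv.1 ++ "_") && decide (PySem.Str.len kv.1 > st.2)
        then (some kv.1, PySem.Str.len kv.1)
        else st) (none, 0)
    = ((if Nat.findGreatest (fun n => pvP base.toList impl n = true) (base.toList.length - 1) = 0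
        then none
        else some (String.ofList (base.toList.take (Nat.findGreatest (fun n => pvP base.toList impl n = true) (base.toList.length - 1))))),
       ((Nat.findGreatest (fun n => pvP base.toList impl n = true) (base.toList.length - 1) : Int))) := by
  induction impl using List.reverseRecOn with
  | nil =>
    simp only [List.foldl_nil]
    have h0 : Nat.findGreatest (fun n => pvP base.toList ([] : List (String × String × String)) n = true) (base.toList.length - 1) = 0 := by
      rw [Nat.findGreatest_eq_zero_iff]
      intro n _ _ h
      simp [pvP] at h
    rw [h0]
    norm_num
  | append_singleton l kv ih =>
    rw [List.foldl_append, List.foldl_cons, List.foldl_nil, ih]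
    have hofl : ∀ l : List Char, (String.ofList l).toList = l := fun l => by simp
    have hsplit : ∀ n, (pvP base.toList (l ++ [kv]) n = true) ↔
        (pvP base.toList l n = true ∨ (n ≠ 0 ∧ base.toList[n]? = some '_' ∧ kv.1.toList = base.toList.take n)) := by
      intro n
      simp only [pvP, List.any_append, List.any_cons, List.any_nil, Bool.or_false,
        Bool.and_eq_true, Bool.or_eq_true, bne_iff_ne, beq_iff_eq]
      tauto
    have hgcongr : Nat.findGreatest (fun n => pvP base.toList (l ++ [kv]) n = true) (base.toList.length - 1)
        = Nat.findGreatest (fun n => pvP base.toList l n = true ∨ (n ≠ 0 ∧ base.toList[n]? = some '_' ∧ kv.1.toList = base.toList.take n)) (base.toList.length - 1) := by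
      congr 1
      funext n
      exact propext (hsplit n)
    obtain ⟨hNle, hNP, hNgr⟩ := Nat.findGreatest_eq_iff.mp
      (rfl : Nat.findGreatest (fun n => pvP base.toList l n = true) (base.toList.length - 1) = _)
    set bs := base.toList with hbs
    set Nl := Nat.findGreatest (fun n => pvP bs l n = true) (bs.length - 1) with hNl
    set m := kv.1.toList.length with hm
    change (if (PySem.Str.startswith base (kv.1 ++ "_") && decide (PySem.Str.len kv.1 > (Nl : Int))) = true
            then ((some kv.1, PySem.Str.len kv.1) : Option String × Int)
            else ((if Nl = 0 then none else some (String.ofList (bs.take Nl))), (Nl : Int))) = _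
    by_cases hc : (PySem.Str.startswith base (kv.1 ++ "_") && decide (PySem.Str.len kv.1 > (Nl : Int))) = true
    · -- kv matches and is strictly longer than the best so far: new maximum is m
      rw [if_pos hc]
      simp only [Bool.and_eq_true, decide_eq_true_eq] at hc
      obtain ⟨hsw, hgt⟩ := hc
      rw [pv_match_cond_iff] at hsw
      obtain ⟨hpre, hund⟩ := hsw
      rw [← hbs, ← hm] at hpre hund
      rw [PySem.Str.len_eq, ← hm] at hgt
      have hNlm : Nl < m := by exact_mod_cast hgt
      obtain ⟨hmlen, -⟩ := List.getElem?_eq_some_iff.mp hund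
      have hNew : Nat.findGreatest (fun n => pvP bs (l ++ [kv]) n = true) (bs.length - 1) = m := by
        rw [hgcongr, Nat.findGreatest_eq_iff]
        refine ⟨by omega, fun _ => Or.inr ⟨by omega, hund, hpre⟩, ?_⟩
        intro n hmn hnk h
        rcases h with h | ⟨-, -, htake⟩
        · exact hNgr (by omega) hnk h
        · have hlt : (bs.take n).length = n := by
            rw [List.length_take]; omega
          have hmn2 : m = n := by rw [hm, htake]; exact hlt
          omega
      rw [hNew, if_neg (by omega)]
      refine Prod.ext_iff.mpr ⟨?_, ?_⟩
      · show some kv.1 = some (String.ofList (bs.take m))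
        congr 1
        apply String.toList_inj.mp
        rw [hofl]
        exact hpre
      · show PySem.Str.len kv.1 = (m : Int)
        rw [PySem.Str.len_eq, ← hm]
    · -- condition false: accumulator unchanged, and the maximum is unchanged too
      rw [if_neg hc]
      have hNew : Nat.findGreatest (fun n => pvP bs (l ++ [kv]) n = true) (bs.length - 1) = Nl := by
        rw [hgcongr, Nat.findGreatest_eq_iff]
        refine ⟨hNle, fun hne => Or.inl (hNP hne), ?_⟩
        intro n hn hnk h
        rcases h with h | ⟨hne, hund, htake⟩
        · exact hNgr hn hnk h
        · apply hc
          obtain ⟨hnlen, -⟩ := List.getElem?_eq_some_iff.mp hund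
          have hmn : m = n := by
            rw [hm, htake, List.length_take]; omega
          simp only [Bool.and_eq_true, decide_eq_true_eq]
          refine ⟨(pv_match_cond_iff base kv).mpr ⟨?_, ?_⟩, ?_⟩
          · show kv.1.toList = bs.take kv.1.toList.length
            rw [← hm, hmn]; exact htake
          · show bs[kv.1.toList.length]? = some '_'
            rw [← hm, hmn]; exact hund
          · rw [PySem.Str.len_eq]
            show ((kv.1.toList.length : Nat) : Int) > (Nl : Int)
            rw [← hm, hmn]
            exact_mod_cast hn
      rw [hNew]

set_option maxHeartbeats 1000000 in
lemma pv_loop_eq (base : String) (impl : List (String × String × String)) :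
    (match (impl.foldl (fun (st : Option String × Int) kv =>
        if PySem.Str.startswith base (kv.1 ++ "_") && decide (PySem.Str.len kv.1 > st.2)
        then (some kv.1, PySem.Str.len kv.1)
        else st) (none, 0)).1 with
     | some best => if best == "" then none else some best
     | none => none)
    = pvAltScan base impl (PySem.Str.len base - 1).toNat := by
  have hofl : ∀ l : List Char, (String.ofList l).toList = l := fun l => by simp
  have hcnt : (PySem.Str.len base - 1).toNat = base.toList.length - 1 := by
    rw [PySem.Str.len_eq]; omega
  rw [pv_foldA_char, pv_altScan_eq, hcnt]
  obtain ⟨hNle, hNP, hNgr⟩ := Nat.findGreatest_eq_iff.mp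
    (rfl : Nat.findGreatest (fun n => pvP base.toList impl n = true) (base.toList.length - 1) = _)
  set bs := base.toList with hbs
  set N := Nat.findGreatest (fun n => pvP bs impl n = true) (bs.length - 1) with hN
  change (match (if N = 0 then (none : Option String) else some (String.ofList (bs.take N))) with
          | some best => if best == "" then none else some best
          | none => none) = _
  by_cases h0 : N = 0
  · rw [if_pos h0]
  · have hPN : pvP bs impl N = true := hNP h0
    have hund : bs[N]? = some '_' := by
      simp only [pvP, Bool.and_eq_true, beq_iff_eq] at hPN
      exact hPN.1.2
    obtain ⟨hNlen, -⟩ := List.getElem?_eq_some_iff.mp hund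
    have hne : (String.ofList (bs.take N) == "") = false := by
      rw [beq_eq_false_iff_ne]
      intro h
      have h2 : bs.take N = [] := by
        have h3 := congrArg String.toList h
        rwa [hofl] at h3
      rcases List.take_eq_nil_iff.mp h2 with h1 | h2'
      · exact h0 h1
      · rw [h2'] at hNlen; exact absurd hNlen (by simp)
    rw [if_neg h0]
    show (if (String.ofList (bs.take N) == "") = true then none else some (String.ofList (bs.take N)))
        = some (String.ofList (bs.take N))
    rw [hne]
    exact if_neg (by simp)

-- ===== VERDICT (by name: the statement is the Claim_ definition above) =====
theorem match_test_to_impl_py_spec : Claim_equal_match_test_to_impl_py := by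
  intro tn impl _
  unfold Spec_match_test_to_impl_py match_test_to_impl_py match_test_to_impl_py_alt
  by_cases hsw : PySem.Str.startswith tn "test_" = true
  · rw [if_pos hsw, if_pos hsw]
    have key : ∀ b : String,
        (if (impl.any (fun kv => kv.1 == b)) = true then some b
         else (match (impl.foldl (fun (st : Option String × Int) kv =>
                 if PySem.Str.startswith b (kv.1 ++ "_") && decide (PySem.Str.len kv.1 > st.2)
                 then (some kv.1, PySem.Str.len kv.1)
                 else st) (none, 0)).1 with
               | some best => if best == "" then none else some best
               | none => none))
      = (if (impl.any (fun kv => kv.1 == b)) = true then some b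
         else pvAltScan b impl (PySem.Str.len b - 1).toNat) := by
      intro b
      by_cases hex : (impl.any (fun kv => kv.1 == b)) = true
      · rw [if_pos hex, if_pos hex]
      · rw [if_neg hex, if_neg hex]
        exact pv_loop_eq b impl
    exact key _
  · rw [if_neg hsw, if_neg hsw]
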